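-- pv_equiv track=rewrite | github.com/joko0811/conv_reverser | conv_reverser/reverser/s3fd_reverse.py | s3fd_feature_num_converter
-- ===== SOURCE A (Python) =====
-- import math
--
-- def s3fd_feature_num_converter(feature_num, feat_sizes):
--     """
--     Args:
--         feature_num: int
--     Returns:
--         target_layer_num, coordinate: int, list
--     """
--     s3fd_magical_feature_list = feat_sizes
--     s3fd_magical_feature_numbers = [
--         s3fd_magical_feature_list[i][0] * s3fd_magical_feature_list[i][1]
--         for i in range(len(s3fd_magical_feature_list))
--     ]
--
--     total = -1
--     offset = -1
--     x, y = -1, -1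
--     for i in range(len(s3fd_magical_feature_list)):
--         if feature_num <= total + s3fd_magical_feature_numbers[i]:
--             target_layer_num = i
--             offset = feature_num - total
--             x = int(offset % s3fd_magical_feature_list[i][1])
--             y = math.floor(offset / s3fd_magical_feature_list[i][1])
--             break
--         total += s3fd_magical_feature_numbers[i]
--     if offset == -1 or y == -1 or x == -1:
--         raise ValueError(
--             f"feature_num must be less than {total}, but got {feature_num}."
--         )
--     max_feature_size = s3fd_magical_feature_list[target_layer_num]
--     max_feature_size = [0, 0, max_feature_size[1], max_feature_size[0]]
--     return target_layer_num, (x, y), max_feature_size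
-- ===== SOURCE B (Python) =====
-- import math
--
-- def s3fd_feature_num_converter(feature_num, feat_sizes):
--     """
--     Args:
--         feature_num: int
--     Returns:
--         target_layer_num, coordinate: int, list
--     """
--     # cumulative pixel counts per layer
--     cum = []
--     t = 0
--     for row in feat_sizes:
--         t += row[0] * row[1]
--         cum.append(t)
--     # binary search (bisect_right): least i with feature_num < cum[i];
--     # cum is nondecreasing for valid (nonnegative) layer shapes
--     lo, hi = 0, len(cum)
--     while lo < hi:
--         mid = (lo + hi) // 2
--         if feature_num < cum[mid]:
--             hi = mid
--         else:
--             lo = mid + 1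
--     if lo == len(cum):
--         raise ValueError(
--             f"feature_num must be less than {t - 1}, but got {feature_num}."
--         )
--     offset = feature_num - (cum[lo - 1] if lo > 0 else 0) + 1
--     w = feat_sizes[lo][1]
--     return lo, (offset % w, math.floor(offset / w)), [0, 0, w, feat_sizes[lo][0]]
-- ===== Notes on version B (the rewrite author's own statement) =====
-- stated objective: alternative
-- what changed: B builds the cumulative pixel-count list once and locates the target layer by a hand-written bisect_right binary search over it, then reconstructs offset and coordinates arithmetically, replacing A's stateful linear scan with its running total/-1 sentinel bookkeeping. Pre_ admits exactly the inputs where A returns normally and the cumulative counts are monotone around feature_num (the binary search's requirement); the non-monotone excluded inputs arise only from malformed layer shapes with negative pixel counts.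
-- outside the precondition, e.g. on s3fd_feature_num_converter(0, [[1, 1], [-1, 1]]): A returns (0, (0, 1), [0, 0, 1, 1]), B raises ValueError
import Mathlib
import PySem

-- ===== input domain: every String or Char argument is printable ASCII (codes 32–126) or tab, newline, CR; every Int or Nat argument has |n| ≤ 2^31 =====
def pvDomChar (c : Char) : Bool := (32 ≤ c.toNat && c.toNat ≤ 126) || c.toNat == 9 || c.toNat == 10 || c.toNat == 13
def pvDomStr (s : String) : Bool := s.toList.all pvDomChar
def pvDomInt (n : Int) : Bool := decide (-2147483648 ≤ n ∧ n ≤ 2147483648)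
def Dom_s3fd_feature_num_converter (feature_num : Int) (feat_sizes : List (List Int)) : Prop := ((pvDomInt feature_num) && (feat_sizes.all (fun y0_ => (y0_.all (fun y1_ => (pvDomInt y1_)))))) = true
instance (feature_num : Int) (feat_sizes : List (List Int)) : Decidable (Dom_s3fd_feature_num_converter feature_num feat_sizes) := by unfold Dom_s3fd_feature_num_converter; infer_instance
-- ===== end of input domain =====

-- B locates the target layer by a bisect_right binary search over the cumulative pixel counts
-- instead of A's stateful linear scan with -1 sentinels; equivalence is proved on Pre_ (A returns
-- normally and the cumulative counts are monotone around feature_num, the binary search's need).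

-- ===== PORT A =====
-- A's loop over range(len(feat_sizes)): carries the running index i and total, returns
-- (target_layer_num, offset, x, y, row) at the break, none when the loop falls through (ValueError).
-- math.floor(offset / w) is ported as exact integer floor division (exact whenever |offset| < 2^53;
-- Source B evaluates the identical Python expression and is ported the same way).
def pvLoopA (feature_num : Int) : List (List Int) → Int → Int → Option (Int × Int × Int × Int × List Int)
  | [], _, _ => none
  | row :: rest, i, total =>
    let cnt := PySem.List.pyGetD row 0 0 * PySem.List.pyGetD row 1 0
    if feature_num ≤ total + cnt then
      let offset := feature_num - total
      let w := PySem.List.pyGetD row 1 0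
      some (i, offset, PySem.Int.mod offset w, PySem.Int.floordiv offset w, row)
    else
      pvLoopA feature_num rest (i + 1) (total + cnt)

def s3fd_feature_num_converter (feature_num : Int) (feat_sizes : List (List Int)) : Int × (Int × Int) × List Int :=
  match pvLoopA feature_num feat_sizes 0 (-1) with
  | none => (0, (0, 0), [])  -- loop fell through: ValueError (excluded by Pre_)
  | some (i, offset, x, y, row) =>
    if offset = -1 ∨ y = -1 ∨ x = -1 then (0, (0, 0), [])  -- ValueError (excluded by Pre_)
    else (i, (x, y), [0, 0, PySem.List.pyGetD row 1 0, PySem.List.pyGetD row 0 0])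

-- ===== PORT B =====
-- cumulative pixel counts per layer (Source B's first loop)
def pvCum : List (List Int) → Int → List Int
  | [], _ => []
  | row :: rest, t =>
    let t' := t + PySem.List.pyGetD row 0 0 * PySem.List.pyGetD row 1 0
    t' :: pvCum rest t'

-- Source B's while lo < hi binary search (bisect_right): least i with feature_num < cum[i]
def pvBisect (feature_num : Int) (cum : List Int) (lo hi : Nat) : Nat :=
  if lo < hi then
    let mid := (lo + hi) / 2
    if feature_num < PySem.List.pyGetD cum (mid : Int) 0 then
      pvBisect feature_num cum lo mid
    else
      pvBisect feature_num cum (mid + 1) hi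
  else lo
termination_by hi - lo
decreasing_by all_goals omega

-- math.floor(offset / w) ported as exact integer floor division, as in port A
def s3fd_feature_num_converter_alt (feature_num : Int) (feat_sizes : List (List Int)) : Int × (Int × Int) × List Int :=
  let cum := pvCum feat_sizes 0
  let i := pvBisect feature_num cum 0 cum.length
  if i = cum.length then (0, (0, 0), [])  -- ValueError (excluded by Pre_)
  else
    let offset := feature_num - (if 0 < i then PySem.List.pyGetD cum ((i : Int) - 1) 0 else 0) + 1
    let w := PySem.List.pyGetD (PySem.List.pyGetD feat_sizes (i : Int) []) 1 0
    ((i : Int), (PySem.Int.mod offset w, PySem.Int.floordiv offset w),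
      [0, 0, w, PySem.List.pyGetD (PySem.List.pyGetD feat_sizes (i : Int) []) 0 0])

-- ===== PRECONDITION & SPEC =====
-- pvPS feat_sizes k = total pixel count of the first k layers (prefix sum of the input's counts)
def pvPS (feat_sizes : List (List Int)) (k : Nat) : Int :=
  ((feat_sizes.map (fun r => r.getD 0 0 * r.getD 1 0)).take k).sum

-- Pre_ = "A returns normally, and the cumulative counts are monotone around feature_num": every
-- row has the two indexed entries (else IndexError); some layer i is the first whose cumulative
-- count exceeds feature_num (else the fall-through ValueError); its width is nonzero (else
-- ZeroDivisionError); none of A's -1 sentinels fires (else the sentinel ValueError); and once a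
-- cumulative count exceeds feature_num every later one does too — the binary search's requirement,
-- violated only by malformed layer shapes with negative pixel counts, where search is meaningless.
def Pre_s3fd_feature_num_converter (feature_num : Int) (feat_sizes : List (List Int)) : Prop :=
  (∀ row ∈ feat_sizes, 2 ≤ row.length) ∧
  (∀ m < feat_sizes.length, ∀ k < m,
    feature_num < pvPS feat_sizes (k + 1) → feature_num < pvPS feat_sizes (m + 1)) ∧
  ∃ i < feat_sizes.length,
    (∀ k < i, pvPS feat_sizes (k + 1) ≤ feature_num) ∧
    feature_num < pvPS feat_sizes (i + 1) ∧
    (feat_sizes.getD i []).getD 1 0 ≠ 0 ∧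
    feature_num - pvPS feat_sizes i + 1 ≠ -1 ∧
    PySem.Int.floordiv (feature_num - pvPS feat_sizes i + 1) ((feat_sizes.getD i []).getD 1 0) ≠ -1 ∧
    PySem.Int.mod (feature_num - pvPS feat_sizes i + 1) ((feat_sizes.getD i []).getD 1 0) ≠ -1
instance (feature_num : Int) (feat_sizes : List (List Int)) : Decidable (Pre_s3fd_feature_num_converter feature_num feat_sizes) := by unfold Pre_s3fd_feature_num_converter; infer_instance

def pvWitness_s3fd_feature_num_converter : Int × List (List Int) := (4, [[2, 3], [1, 2]])

def Spec_s3fd_feature_num_converter (feature_num : Int) (feat_sizes : List (List Int)) (out : Int × (Int × Int) × List Int) : Prop := out = s3fd_feature_num_converter_alt feature_num feat_sizes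
instance (feature_num : Int) (feat_sizes : List (List Int)) (out : Int × (Int × Int) × List Int) : Decidable (Spec_s3fd_feature_num_converter feature_num feat_sizes out) := by unfold Spec_s3fd_feature_num_converter; infer_instance

-- ===== CLAIM (what is proved, stated in full; the proofs are below) =====
def Claim_equal_s3fd_feature_num_converter : Prop := ∀ (feature_num : Int) (feat_sizes : List (List Int)), Dom_s3fd_feature_num_converter feature_num feat_sizes → Pre_s3fd_feature_num_converter feature_num feat_sizes → Spec_s3fd_feature_num_converter feature_num feat_sizes (s3fd_feature_num_converter feature_num feat_sizes)

-- ===== LEMMAS AND PROOFS =====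

-- per-layer pixel count (proof-side shorthand)
def pvCnt (row : List Int) : Int := row.getD 0 0 * row.getD 1 0

theorem pvGetD_eq (row : List Int) (_h : 2 ≤ row.length) :
    PySem.List.pyGetD row 0 0 = row.getD 0 0 ∧ PySem.List.pyGetD row 1 0 = row.getD 1 0 := by
  refine ⟨PySem.List.pyGetD_zero _ _, ?_⟩
  have h1 : (1 : Int) = ((1 : Nat) : Int) := by norm_num
  rw [h1, PySem.List.pyGetD_natCast]

theorem pvCum_length (fs : List (List Int)) (t : Int) : (pvCum fs t).length = fs.length := by
  induction fs generalizing t with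
  | nil => rfl
  | cons r rest ih => simp [pvCum, ih]

theorem pvCnt_of_len (row : List Int) (h : 2 ≤ row.length) :
    PySem.List.pyGetD row 0 0 * PySem.List.pyGetD row 1 0 = pvCnt row := by
  rw [(pvGetD_eq row h).1, (pvGetD_eq row h).2]; rfl

theorem pvPS_cons (r : List Int) (rest : List (List Int)) (k : Nat) :
    pvPS (r :: rest) (k + 1) = pvCnt r + pvPS rest k := by
  simp [pvPS, pvCnt, List.take_succ_cons]

theorem pvCum_getD (fs : List (List Int)) (t : Int) (hlen : ∀ row ∈ fs, 2 ≤ row.length)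
    (k : Nat) (hk : k < fs.length) :
    (pvCum fs t).getD k 0 = t + pvPS fs (k + 1) := by
  induction fs generalizing t k with
  | nil => simp at hk
  | cons r rest ih =>
    have hr := hlen r (List.mem_cons_self ..)
    rw [pvCum]
    simp only [pvCnt_of_len r hr]
    cases k with
    | zero => simp [pvPS, pvCnt, List.getD]
    | succ k =>
      have hk' : k < rest.length := by simpa using hk
      rw [List.getD_cons_succ, ih _ (fun row hrow => hlen row (List.mem_cons_of_mem _ hrow)) k hk',
        pvPS_cons]
      ring

theorem findIdx_spec (l : List Int) (p : Int → Bool) :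
    (∀ k (h : k < l.length), k < l.findIdx p → p l[k] = false) ∧
    (∀ h : l.findIdx p < l.length, p (l[l.findIdx p]'h) = true) ∧ l.findIdx p ≤ l.length := by
  induction l with
  | nil => simp
  | cons a rest ih =>
    cases hp : p a
    · simp only [List.findIdx_cons, hp, cond_false]
      refine ⟨?_, ?_, by simpa using ih.2.2⟩
      · intro k hk hklt
        cases k with
        | zero => simpa using hp
        | succ k => exact ih.1 k (by simpa using hk) (by omega)
      · intro h
        exact ih.2.1 (by simpa using h)
    · simp only [List.findIdx_cons, hp, cond_true]
      exact ⟨fun k hk hklt => by omega, fun h => by simpa using hp, by simp⟩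

-- A's loop characterised by the first index whose cumulative count exceeds feature_num
theorem pvLoopA_spec (fn : Int) : ∀ (fs : List (List Int)) (t i : Int),
    (∀ row ∈ fs, 2 ≤ row.length) →
    ∀ cum jj, cum = pvCum fs t → jj = cum.findIdx (fun c => fn < c) →
    pvLoopA fn fs i (t - 1) =
      (if jj < fs.length then
        some (i + (jj : Int),
          fn - (if jj = 0 then t else cum.getD (jj - 1) 0) + 1,
          PySem.Int.mod (fn - (if jj = 0 then t else cum.getD (jj - 1) 0) + 1) ((fs.getD jj []).getD 1 0),
          PySem.Int.floordiv (fn - (if jj = 0 then t else cum.getD (jj - 1) 0) + 1) ((fs.getD jj []).getD 1 0),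
          fs.getD jj [])
      else none) := by
  intro fs
  induction fs with
  | nil =>
    intro t i hlen cum jj hc hj
    subst hc; subst hj
    simp [pvLoopA, pvCum]
  | cons r rest ih =>
    intro t i hlen cum jj hc hj
    subst hc; subst hj
    have hr := hlen r (List.mem_cons_self ..)
    have hrest : ∀ row ∈ rest, 2 ≤ row.length := fun row hrow => hlen row (List.mem_cons_of_mem _ hrow)
    simp only [pvLoopA, pvCum, pvCnt_of_len r hr]
    by_cases hlt : fn < t + pvCnt r
    · have hfi : List.findIdx (fun c => fn < c) ((t + pvCnt r) :: pvCum rest (t + pvCnt r)) = 0 := by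
        simp [List.findIdx_cons, hlt]
      rw [hfi]
      have hc1 : fn ≤ t - 1 + pvCnt r := by omega
      have harg : fn - (t - 1) = fn - t + 1 := by ring
      simp [hc1, harg, (pvGetD_eq r hr).2]
    · have hfi : List.findIdx (fun c => fn < c) ((t + pvCnt r) :: pvCum rest (t + pvCnt r)) =
          List.findIdx (fun c => fn < c) (pvCum rest (t + pvCnt r)) + 1 := by
        simp [List.findIdx_cons, hlt]
      have hc2 : ¬ fn ≤ t - 1 + pvCnt r := by omega
      rw [hfi, if_neg hc2, show t - 1 + pvCnt r = (t + pvCnt r) - 1 from by ring,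
        ih (t + pvCnt r) (i + 1) hrest _ _ rfl rfl]
      by_cases hlt2 : List.findIdx (fun c => fn < c) (pvCum rest (t + pvCnt r)) < rest.length
      · rw [if_pos hlt2, if_pos (show List.findIdx (fun c => fn < c) (pvCum rest (t + pvCnt r)) + 1 < (r :: rest).length from by simpa using hlt2)]
        cases hj' : List.findIdx (fun c => fn < c) (pvCum rest (t + pvCnt r)) with
        | zero => simp
        | succ m =>
          simp only [List.getD_cons_succ, Nat.add_sub_cancel, Nat.succ_ne_zero, if_false]
          rw [show i + 1 + ((m + 1 : Nat) : Int) = i + ((m + 1 + 1 : Nat) : Int) from by push_cast; ring]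
      · rw [if_neg hlt2, if_neg (show ¬ (List.findIdx (fun c => fn < c) (pvCum rest (t + pvCnt r)) + 1 < (r :: rest).length) from by simpa using hlt2)]

-- the binary search returns a first index with feature_num < cum[·], given monotone membership
theorem pvBisect_spec (fn : Int) (cum : List Int)
    (hmono : ∀ k m : Nat, k ≤ m → m < cum.length → fn < cum.getD k 0 → fn < cum.getD m 0) :
    ∀ d lo hi, hi - lo = d → lo ≤ hi → hi ≤ cum.length →
    (∀ k < lo, ¬ fn < cum.getD k 0) →
    (∀ k, hi ≤ k → k < cum.length → fn < cum.getD k 0) →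
    (∀ k < pvBisect fn cum lo hi, ¬ fn < cum.getD k 0) ∧
    (pvBisect fn cum lo hi < cum.length → fn < cum.getD (pvBisect fn cum lo hi) 0) ∧
    pvBisect fn cum lo hi ≤ cum.length := by
  intro d
  induction d using Nat.strong_induction_on with
  | _ d ih =>
    intro lo hi hd hlohi hhin hleft hright
    rw [pvBisect]
    by_cases hlt : lo < hi
    · rw [if_pos hlt]
      have hmidlt : (lo + hi) / 2 < hi := by omega
      have hmidge : lo ≤ (lo + hi) / 2 := by omega
      have hmidn : (lo + hi) / 2 < cum.length := by omega
      have hget : PySem.List.pyGetD cum (((lo + hi) / 2 : Nat) : Int) 0 = cum.getD ((lo + hi) / 2) 0 :=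
        PySem.List.pyGetD_natCast ..
      simp only [hget]
      by_cases hp : fn < cum.getD ((lo + hi) / 2) 0
      · rw [if_pos hp]
        exact ih ((lo + hi) / 2 - lo) (by omega) lo ((lo + hi) / 2) rfl (by omega) (by omega)
          hleft (fun k hk hkn => hmono _ k hk hkn hp)
      · rw [if_neg hp]
        refine ih (hi - ((lo + hi) / 2 + 1)) (by omega) ((lo + hi) / 2 + 1) hi rfl (by omega) hhin
          ?_ hright
        intro k hk hfk
        rcases Nat.lt_or_ge k lo with h | h
        · exact hleft k h hfk
        · exact hp (hmono k ((lo + hi) / 2) (by omega) hmidn hfk)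
    · rw [if_neg hlt]
      have : lo = hi := by omega
      exact ⟨hleft, fun h => hright lo (by omega) h, by omega⟩

-- ===== VERDICT (by name: the statement is the Claim_ definition above) =====
theorem s3fd_feature_num_converter_spec : Claim_equal_s3fd_feature_num_converter := by
  intro fn fs _hdom hpre
  obtain ⟨hlen, hmonoPS, i, hiltn, hfirst, hbreak, hwne, hoffne, hyne, hxne⟩ := hpre
  unfold Spec_s3fd_feature_num_converter
  have hcl : (pvCum fs 0).length = fs.length := pvCum_length fs 0
  have hgetd : ∀ k, k < fs.length → (pvCum fs 0).getD k 0 = pvPS fs (k + 1) := by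
    intro k hk
    rw [pvCum_getD fs 0 hlen k hk]
    ring
  -- A's linear scan finds i (the first index with fn < cum)
  have hfs := findIdx_spec (pvCum fs 0) (fun c => fn < c)
  set j := (pvCum fs 0).findIdx (fun c => fn < c) with hj
  have hji : j = i := by
    have h1 : j ≤ i := by
      by_contra hcon
      push_neg at hcon
      have hilen : i < (pvCum fs 0).length := by omega
      have ht := hfs.1 i hilen hcon
      simp only [decide_eq_false_iff_not] at ht
      rw [← List.getD_eq_getElem _ 0 hilen, hgetd i (by omega)] at ht
      omega
    have h2 : i ≤ j := by
      by_contra hcon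
      push_neg at hcon
      have hjlen : j < (pvCum fs 0).length := by omega
      have ht := hfs.2.1 hjlen
      simp only [decide_eq_true_eq] at ht
      rw [← List.getD_eq_getElem _ 0 hjlen, hgetd j (by omega)] at ht
      have := hfirst j hcon
      omega
    omega
  rw [← hji] at hfirst hbreak hwne hoffne hyne hxne
  have hjlt : j < fs.length := by omega
  -- A via the loop characterisation
  have heq := pvLoopA_spec fn fs 0 0 hlen (pvCum fs 0) j rfl hj
  rw [if_pos hjlt] at heq
  have hprev_eq : (if j = 0 then (0 : Int) else (pvCum fs 0).getD (j - 1) 0) = pvPS fs j := by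
    by_cases hj0 : j = 0
    · rw [if_pos hj0, hj0]
      simp [pvPS]
    · rw [if_neg hj0, hgetd (j - 1) (by omega), show j - 1 + 1 = j from by omega]
  rw [hprev_eq] at heq
  rw [show ((0:Int) - 1) = -1 from by norm_num] at heq
  set off := fn - pvPS fs j + 1 with hoff
  set w := (fs.getD j []).getD 1 0 with hw
  unfold s3fd_feature_num_converter
  simp only [heq]
  rw [if_neg (show ¬(off = -1 ∨ PySem.Int.floordiv off w = -1 ∨ PySem.Int.mod off w = -1) from by
    push_neg
    exact ⟨hoffne, hyne, hxne⟩)]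
  -- B: the binary search over the (monotone around fn) prefix sums finds the same layer
  have hmono : ∀ k m : Nat, k ≤ m → m < (pvCum fs 0).length → fn < (pvCum fs 0).getD k 0 →
      fn < (pvCum fs 0).getD m 0 := by
    intro k m hkm hm hk
    rcases Nat.eq_or_lt_of_le hkm with h | h
    · rwa [← h]
    rw [hgetd m (by omega)]
    rw [hgetd k (by omega)] at hk
    exact hmonoPS m (by omega) k h hk
  have hbs := pvBisect_spec fn (pvCum fs 0) hmono (pvCum fs 0).length 0 (pvCum fs 0).length rfl
    (by omega) (by omega) (by omega) (by omega)
  set r := pvBisect fn (pvCum fs 0) 0 (pvCum fs 0).length with hr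
  have hri : r = j := by
    have h1 : r ≤ j := by
      by_contra hcon
      push_neg at hcon
      have hPj : fn < (pvCum fs 0).getD j 0 := by
        rw [hgetd j (by omega)]; omega
      exact hbs.1 j hcon hPj
    have h2 : j ≤ r := by
      by_contra hcon
      push_neg at hcon
      have hPr := hbs.2.1 (by omega)
      rw [hgetd r (by omega)] at hPr
      have := hfirst r hcon
      omega
    omega
  unfold s3fd_feature_num_converter_alt
  simp only [← hr, hri]
  rw [if_neg (show ¬ j = (pvCum fs 0).length from by omega)]
  have hrow : PySem.List.pyGetD fs (j : Int) [] = fs.getD j [] := PySem.List.pyGetD_natCast ..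
  have hprevB : (if 0 < j then PySem.List.pyGetD (pvCum fs 0) ((j : Int) - 1) 0 else 0) = pvPS fs j := by
    by_cases hj0 : j = 0
    · rw [if_neg (by omega), hj0]
      simp [pvPS]
    · rw [if_pos (by omega), show ((j : Int) - 1) = ((j - 1 : Nat) : Int) from by omega,
        PySem.List.pyGetD_natCast, hgetd (j - 1) (by omega), show j - 1 + 1 = j from by omega]
  rw [hrow, hprevB]
  have hwgd : PySem.List.pyGetD (fs.getD j []) 1 0 = (fs.getD j []).getD 1 0 :=
    (pvGetD_eq _ (hlen _ (by rw [List.getD_eq_getElem _ _ hjlt]; exact List.getElem_mem _))).2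
  rw [hwgd]
  simp
  exact ⟨rfl, rfl⟩
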